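-- pv_equiv track=rewrite | github.com/joriener/ei-fragment-calculator | ei_fragment_calculator/confidence.py | _formula_difference_matches
-- ===== SOURCE A (Python) =====
-- def _formula_difference_matches(
--     comp_a: dict[str, int],
--     comp_b: dict[str, int],
--     nl_formula: dict[str, int],
-- ) -> bool:
--     """
--     Return True if comp_a - comp_b == nl_formula (within ±1 H for
--     hydrogen-rearrangement tolerance).
--
--     comp_a must correspond to the higher-m/z peak (mz_a > mz_b) so that
--     the difference comp_a - comp_b is positive for normal neutral loss.
--     """
--     all_els = set(comp_a) | set(comp_b) | set(nl_formula)
--     diff = {el: comp_a.get(el, 0) - comp_b.get(el, 0) for el in all_els}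
--     diff = {el: v for el, v in diff.items() if v != 0}
--
--     # Guard: negative elements mean comp_b > comp_a for that element
--     if any(v < 0 for v in diff.values()):
--         return False
--
--     # Exact match
--     nl_clean = {el: v for el, v in nl_formula.items() if v != 0}
--     if diff == nl_clean:
--         return True
--
--     # ±1 H rearrangement
--     for h_delta in (-1, 1):
--         adjusted = dict(nl_clean)
--         adjusted["H"] = adjusted.get("H", 0) + h_delta
--         adjusted = {el: v for el, v in adjusted.items() if v != 0}
--         if diff == adjusted:
--             return True
--
--     return False
-- ===== SOURCE B (Python) =====
-- def _formula_difference_matches(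
--     comp_a: dict[str, int],
--     comp_b: dict[str, int],
--     nl_formula: dict[str, int],
-- ) -> bool:
--     """Single pass over the union of keys: reject any negative difference,
--     require non-H differences to equal the neutral-loss entry exactly, and
--     allow the hydrogen difference to be within +/-1 of the neutral loss."""
--     d_h = 0
--     n_h = 0
--     for el in set(comp_a) | set(comp_b) | set(nl_formula):
--         d = comp_a.get(el, 0) - comp_b.get(el, 0)
--         n = nl_formula.get(el, 0)
--         if d < 0:
--             return False
--         if el == "H":
--             d_h, n_h = d, n
--         elif d != n:
--             return False
--     return abs(d_h - n_h) <= 1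
-- ===== Notes on version B (the rewrite author's own statement) =====
-- stated objective: simpler
-- what changed: Instead of materialising the zero-filtered difference dict plus three H-adjusted copies of the neutral-loss dict and comparing dicts, B makes one pass over the union of keys, rejecting any negative difference or non-H mismatch and finally checking |H-difference - H-neutral-loss| <= 1.
import Mathlib
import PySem

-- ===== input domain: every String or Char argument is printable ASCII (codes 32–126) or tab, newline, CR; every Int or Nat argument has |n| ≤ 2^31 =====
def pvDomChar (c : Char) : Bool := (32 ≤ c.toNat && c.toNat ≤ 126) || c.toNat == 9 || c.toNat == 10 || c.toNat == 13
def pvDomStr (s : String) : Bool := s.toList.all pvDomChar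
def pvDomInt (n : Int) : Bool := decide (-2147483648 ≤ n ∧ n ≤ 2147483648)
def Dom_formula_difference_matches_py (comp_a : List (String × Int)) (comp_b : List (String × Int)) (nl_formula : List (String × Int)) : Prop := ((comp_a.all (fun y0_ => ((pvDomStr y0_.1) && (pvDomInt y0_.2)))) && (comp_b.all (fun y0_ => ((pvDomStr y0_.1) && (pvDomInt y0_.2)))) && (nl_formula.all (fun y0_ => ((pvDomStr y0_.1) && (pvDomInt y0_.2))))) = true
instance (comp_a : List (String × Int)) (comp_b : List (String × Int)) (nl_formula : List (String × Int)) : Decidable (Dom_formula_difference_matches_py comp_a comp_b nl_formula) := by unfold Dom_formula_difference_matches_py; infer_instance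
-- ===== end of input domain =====

-- B replaces A's three adjusted-dict constructions and dict comparisons by one pass
-- over the union of keys with an |H-difference| ≤ 1 check (objective: simpler).

-- ===== PORT A =====
-- Python's `d1 == d2` on dicts ignores order: same keys, same values.
def pyDictEq (d e : PySem.Dict String Int) : Bool :=
  (PySem.Dict.keys d).all (fun k => PySem.Dict.get? e k == PySem.Dict.get? d k) &&
  (PySem.Dict.keys e).all (fun k => PySem.Dict.get? d k == PySem.Dict.get? e k)

def formula_difference_matches_py (comp_a : List (String × Int)) (comp_b : List (String × Int)) (nl_formula : List (String × Int)) : Bool :=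
  let da := PySem.Dict.ofList comp_a
  let db := PySem.Dict.ofList comp_b
  let dn := PySem.Dict.ofList nl_formula
  let all_els : PySem.Set String :=
    PySem.Set.union (PySem.Set.union (PySem.Set.ofList (PySem.Dict.keys da)) (PySem.Dict.keys db)) (PySem.Dict.keys dn)
  let diff0 : PySem.Dict String Int :=
    all_els.foldl (fun d el => d.insert el (PySem.Dict.getD da el 0 - PySem.Dict.getD db el 0)) PySem.Dict.empty
  let diff : PySem.Dict String Int := PySem.Dict.mk (diff0.items.filter (fun p => !(p.2 == 0)))
  if (PySem.Dict.values diff).any (fun v => decide (v < 0)) then false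
  else
    let nl_clean : PySem.Dict String Int := PySem.Dict.mk (dn.items.filter (fun p => !(p.2 == 0)))
    if pyDictEq diff nl_clean then true
    else
      [(-1 : Int), 1].any (fun h_delta =>
        let adjusted0 := PySem.Dict.insert nl_clean "H" (PySem.Dict.getD nl_clean "H" 0 + h_delta)
        let adjusted : PySem.Dict String Int := PySem.Dict.mk (adjusted0.items.filter (fun p => !(p.2 == 0)))
        pyDictEq diff adjusted)

-- ===== PORT B =====
def fdmAltLoop (da db dn : PySem.Dict String Int) : List String → Int → Int → Bool
  | [], dH, nH => decide (|dH - nH| ≤ 1)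
  | el :: rest, dH, nH =>
    let d := PySem.Dict.getD da el 0 - PySem.Dict.getD db el 0
    let n := PySem.Dict.getD dn el 0
    if d < 0 then false
    else if el == "H" then fdmAltLoop da db dn rest d n
    else if !(d == n) then false
    else fdmAltLoop da db dn rest dH nH

def formula_difference_matches_py_alt (comp_a : List (String × Int)) (comp_b : List (String × Int)) (nl_formula : List (String × Int)) : Bool :=
  let da := PySem.Dict.ofList comp_a
  let db := PySem.Dict.ofList comp_b
  let dn := PySem.Dict.ofList nl_formula
  let keys : PySem.Set String :=
    PySem.Set.union (PySem.Set.union (PySem.Set.ofList (PySem.Dict.keys da)) (PySem.Dict.keys db)) (PySem.Dict.keys dn)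
  fdmAltLoop da db dn keys 0 0

-- ===== PRECONDITION & SPEC =====
def Spec_formula_difference_matches_py (comp_a : List (String × Int)) (comp_b : List (String × Int)) (nl_formula : List (String × Int)) (out : Bool) : Prop := out = formula_difference_matches_py_alt comp_a comp_b nl_formula
instance (comp_a : List (String × Int)) (comp_b : List (String × Int)) (nl_formula : List (String × Int)) (out : Bool) : Decidable (Spec_formula_difference_matches_py comp_a comp_b nl_formula out) := by unfold Spec_formula_difference_matches_py; infer_instance

-- ===== CLAIM (what is proved, stated in full; the proofs are below) =====
def Claim_equal_formula_difference_matches_py : Prop := ∀ (comp_a : List (String × Int)) (comp_b : List (String × Int)) (nl_formula : List (String × Int)), Dom_formula_difference_matches_py comp_a comp_b nl_formula → Spec_formula_difference_matches_py comp_a comp_b nl_formula (formula_difference_matches_py comp_a comp_b nl_formula)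

-- ===== LEMMAS AND PROOFS =====

-- `{el: v for el, v in l if v != 0}`-style lookups, written as an Option postcomposition
def fdmToOpt (v : Int) : Option Int := if v = 0 then none else some v

theorem fdmToOpt_inj (a b : Int) : fdmToOpt a = fdmToOpt b ↔ a = b := by
  unfold fdmToOpt
  by_cases ha : a = 0 <;> by_cases hb : b = 0 <;> simp [ha, hb] <;> omega

theorem get?_foldl_insert (f : String → Int) (l : List String) (acc : PySem.Dict String Int) (k : String) :
    (l.foldl (fun d el => d.insert el (f el)) acc).get? k
      = if k ∈ l then some (f k) else PySem.Dict.get? acc k := by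
  induction l generalizing acc with
  | nil => simp
  | cons a t ih =>
    simp only [List.foldl_cons, ih, List.mem_cons, PySem.Dict.get?_insert]
    by_cases h : k ∈ t
    · simp [h]
    · by_cases hk : k = a <;> simp [h, hk]

theorem nodup_keys_foldl_insert (f : String → Int) (l : List String) (acc : PySem.Dict String Int)
    (h : (PySem.Dict.keys acc).Nodup) :
    (PySem.Dict.keys (l.foldl (fun d el => d.insert el (f el)) acc)).Nodup := by
  induction l generalizing acc with
  | nil => simpa using h
  | cons a t ih => exact ih _ (PySem.Dict.nodup_keys_insert _ _ _ h)

theorem get?_mk_filter_none (q : String × Int → Bool) (l : List (String × Int)) (k : String)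
    (h : k ∉ l.map Prod.fst) : (PySem.Dict.mk (l.filter q)).get? k = none := by
  rw [PySem.Dict.get?_eq_none_iff_not_mem_keys]
  simp only [PySem.Dict.keys_mk, List.mem_map] at *
  rintro ⟨p, hp, rfl⟩
  exact h ⟨p, (List.mem_filter.mp hp).1, rfl⟩

theorem get?_mk_filter (l : List (String × Int)) (k : String) (h : (l.map Prod.fst).Nodup) :
    (PySem.Dict.mk (l.filter (fun p => !(p.2 == 0)))).get? k
      = ((PySem.Dict.mk l).get? k).bind fdmToOpt := by
  unfold fdmToOpt
  induction l with
  | nil => simp [PySem.Dict.get?]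
  | cons a t ih =>
    simp only [List.map_cons, List.nodup_cons] at h
    by_cases hk : a.1 = k
    · by_cases hz : a.2 = 0
      · rw [List.filter_cons_of_neg (by simp [hz])]
        rw [get?_mk_filter_none _ _ _ (hk ▸ h.1)]
        rw [PySem.Dict.get?_mk_cons]
        simp [hk, hz]
      · rw [List.filter_cons_of_pos (by simp [hz])]
        rw [PySem.Dict.get?_mk_cons, PySem.Dict.get?_mk_cons]
        simp [hk, hz]
    · by_cases hz : a.2 = 0
      · rw [List.filter_cons_of_neg (by simp [hz])]
        rw [ih h.2, PySem.Dict.get?_mk_cons]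
        simp [hk]
      · rw [List.filter_cons_of_pos (by simp [hz])]
        rw [PySem.Dict.get?_mk_cons, PySem.Dict.get?_mk_cons, ih h.2]
        simp [hk]

theorem pyDictEq_iff (d e : PySem.Dict String Int) :
    pyDictEq d e = true ↔ ∀ k, PySem.Dict.get? d k = PySem.Dict.get? e k := by
  unfold pyDictEq
  simp only [Bool.and_eq_true, List.all_eq_true, beq_iff_eq]
  constructor
  · rintro ⟨h1, h2⟩ k
    by_cases hd : k ∈ PySem.Dict.keys d
    · exact (h1 k hd).symm
    · by_cases he : k ∈ PySem.Dict.keys e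
      · exact h2 k he
      · rw [(PySem.Dict.get?_eq_none_iff_not_mem_keys d k).mpr hd,
            (PySem.Dict.get?_eq_none_iff_not_mem_keys e k).mpr he]
  · intro h; exact ⟨fun k _ => (h k).symm, fun k _ => h k⟩

theorem values_any_neg (d : PySem.Dict String Int) (h : (PySem.Dict.keys d).Nodup) :
    (PySem.Dict.values d).any (fun v => decide (v < 0)) = true
      ↔ ∃ k v, PySem.Dict.get? d k = some v ∧ v < 0 := by
  constructor
  · intro hh
    simp only [List.any_eq_true, decide_eq_true_eq] at hh
    obtain ⟨v, hv, hneg⟩ := hh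
    obtain ⟨⟨k0, v0⟩, hp, rfl⟩ := List.mem_map.mp hv
    exact ⟨k0, v0, PySem.Dict.get?_of_mem_items d hp h, hneg⟩
  · rintro ⟨k, v, hget, hneg⟩
    simp only [List.any_eq_true, decide_eq_true_eq]
    exact ⟨v, List.mem_map.mpr ⟨(k, v), PySem.Dict.mem_items_of_get?_eq_some d hget, rfl⟩, hneg⟩

theorem fdmAltLoop_spec (da db dn : PySem.Dict String Int) (l : List String) (dH nH : Int) :
    fdmAltLoop da db dn l dH nH = true ↔
      ((∀ el ∈ l, 0 ≤ PySem.Dict.getD da el 0 - PySem.Dict.getD db el 0 ∧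
          (el ≠ "H" → PySem.Dict.getD da el 0 - PySem.Dict.getD db el 0 = PySem.Dict.getD dn el 0)) ∧
        (if "H" ∈ l then
            |(PySem.Dict.getD da "H" 0 - PySem.Dict.getD db "H" 0) - PySem.Dict.getD dn "H" 0| ≤ 1
          else |dH - nH| ≤ 1)) := by
  induction l generalizing dH nH with
  | nil => simp [fdmAltLoop]
  | cons a t ih =>
    simp only [fdmAltLoop, List.mem_cons]
    by_cases hd : PySem.Dict.getD da a 0 - PySem.Dict.getD db a 0 < 0
    · simp only [if_pos hd]
      constructor
      · intro h; exact absurd h (by simp)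
      · rintro ⟨h1, _⟩
        exact absurd ((h1 a (Or.inl rfl)).1) (by omega)
    · simp only [if_neg hd]
      by_cases hH : a = "H"
      · subst hH
        rw [if_pos (by simp), ih]
        constructor
        · rintro ⟨h1, h2⟩
          refine ⟨?_, ?_⟩
          · rintro el (rfl | hel)
            · exact ⟨by omega, fun hne => absurd rfl hne⟩
            · exact h1 el hel
          · rw [if_pos (Or.inl rfl)]
            split_ifs at h2 with ht <;> exact h2
        · rintro ⟨h1, h2⟩
          rw [if_pos (Or.inl rfl)] at h2
          refine ⟨fun el hel => h1 el (Or.inr hel), ?_⟩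
          split_ifs with ht <;> exact h2
      · have hiff : ("H" = a ∨ "H" ∈ t) ↔ ("H" ∈ t) := or_iff_right (fun h => hH h.symm)
        rw [if_neg (by simpa using hH)]
        by_cases hdn : PySem.Dict.getD da a 0 - PySem.Dict.getD db a 0 = PySem.Dict.getD dn a 0
        · rw [if_neg (by simpa using hdn), ih]
          constructor
          · rintro ⟨h1, h2⟩
            refine ⟨?_, ?_⟩
            · rintro el (rfl | hel)
              · exact ⟨by omega, fun _ => hdn⟩
              · exact h1 el hel
            · rw [if_congr hiff rfl rfl]; exact h2
          · rintro ⟨h1, h2⟩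
            rw [if_congr hiff rfl rfl] at h2
            exact ⟨fun el hel => h1 el (Or.inr hel), h2⟩
        · rw [if_pos (by simpa using hdn)]
          constructor
          · intro h; exact absurd h (by simp)
          · rintro ⟨h1, _⟩
            exact absurd ((h1 a (Or.inl rfl)).2 hH) hdn

theorem fdm_port_eq (comp_a comp_b nl_formula : List (String × Int)) :
    formula_difference_matches_py comp_a comp_b nl_formula
      = formula_difference_matches_py_alt comp_a comp_b nl_formula := by
  rw [Bool.eq_iff_iff]
  unfold formula_difference_matches_py formula_difference_matches_py_alt
  simp only []
  set da := PySem.Dict.ofList comp_a with hda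
  set db := PySem.Dict.ofList comp_b with hdb
  set dn := PySem.Dict.ofList nl_formula with hdn
  set ks : PySem.Set String :=
    PySem.Set.union (PySem.Set.union (PySem.Set.ofList (PySem.Dict.keys da)) (PySem.Dict.keys db)) (PySem.Dict.keys dn) with hks
  -- abbreviations for the per-element difference and neutral-loss value
  set Dv : String → Int := fun k => PySem.Dict.getD da k 0 - PySem.Dict.getD db k 0 with hDv
  set Nv : String → Int := fun k => PySem.Dict.getD dn k 0 with hNv
  have hDv' : ∀ k, Dv k = PySem.Dict.getD da k 0 - PySem.Dict.getD db k 0 := fun _ => rfl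
  have hNv' : ∀ k, Nv k = PySem.Dict.getD dn k 0 := fun _ => rfl
  -- outside the key union everything is zero
  have hout : ∀ k, k ∉ ks → Dv k = 0 ∧ Nv k = 0 := by
    intro k hk
    rw [hks] at hk
    simp only [PySem.Set.mem_union, PySem.Set.mem_ofList] at hk
    push_neg at hk
    have h1 : PySem.Dict.get? da k = none := (PySem.Dict.get?_eq_none_iff_not_mem_keys da k).mpr hk.1.1
    have h2 : PySem.Dict.get? db k = none := (PySem.Dict.get?_eq_none_iff_not_mem_keys db k).mpr hk.1.2
    have h3 : PySem.Dict.get? dn k = none := (PySem.Dict.get?_eq_none_iff_not_mem_keys dn k).mpr hk.2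
    rw [hDv, hNv]
    simp [PySem.Dict.getD_eq_get?_getD, h1, h2, h3]
  -- the zero-filtered difference dict looks up to fdmToOpt ∘ Dv
  set diff0 : PySem.Dict String Int :=
    ks.foldl (fun d el => d.insert el (PySem.Dict.getD da el 0 - PySem.Dict.getD db el 0)) PySem.Dict.empty with hdiff0
  have hd0nodup : (PySem.Dict.keys diff0).Nodup := by
    rw [hdiff0]
    exact nodup_keys_foldl_insert _ ks PySem.Dict.empty (by simp)
  have hd0get : ∀ k, PySem.Dict.get? diff0 k = if k ∈ ks then some (Dv k) else none := by
    intro k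
    rw [hdiff0]
    rw [get?_foldl_insert (fun el => PySem.Dict.getD da el 0 - PySem.Dict.getD db el 0) ks PySem.Dict.empty k]
    simp [hDv]
  set diff : PySem.Dict String Int := PySem.Dict.mk (diff0.items.filter (fun p => !(p.2 == 0))) with hdiff
  have hdget : ∀ k, PySem.Dict.get? diff k = fdmToOpt (Dv k) := by
    intro k
    rw [hdiff, get?_mk_filter diff0.items k hd0nodup]
    show (PySem.Dict.get? diff0 k).bind fdmToOpt = fdmToOpt (Dv k)
    rw [hd0get k]
    by_cases hk : k ∈ ks
    · simp [hk]
    · simp [hk, (hout k hk).1, fdmToOpt]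
  have hdnodup : (PySem.Dict.keys diff).Nodup := by
    rw [hdiff]
    exact List.Sublist.nodup (List.Sublist.map _ List.filter_sublist) hd0nodup
  -- the cleaned neutral-loss dict looks up to fdmToOpt ∘ Nv
  set nlc : PySem.Dict String Int := PySem.Dict.mk (dn.items.filter (fun p => !(p.2 == 0))) with hnlc
  have hnget : ∀ k, PySem.Dict.get? nlc k = fdmToOpt (Nv k) := by
    intro k
    rw [hnlc, get?_mk_filter dn.items k (PySem.Dict.nodup_keys_ofList nl_formula)]
    show (PySem.Dict.get? dn k).bind fdmToOpt = fdmToOpt (Nv k)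
    rw [hNv]
    simp only [PySem.Dict.getD_eq_get?_getD]
    cases h : PySem.Dict.get? dn k with
    | none => simp [fdmToOpt]
    | some v => simp
  have hnnodup : (PySem.Dict.keys nlc).Nodup := by
    rw [hnlc]
    exact List.Sublist.nodup (List.Sublist.map _ List.filter_sublist) (PySem.Dict.nodup_keys_ofList nl_formula)
  have hnlcH : PySem.Dict.getD nlc "H" 0 = Nv "H" := by
    rw [PySem.Dict.getD_eq_get?_getD, hnget "H"]
    by_cases h : Nv "H" = 0 <;> simp [fdmToOpt, h]
  -- the ±1-adjusted dicts look up to fdmToOpt of the H-shifted Nv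
  have hadjget : ∀ (δ : Int) (k : String),
      PySem.Dict.get? (PySem.Dict.mk ((PySem.Dict.insert nlc "H" (PySem.Dict.getD nlc "H" 0 + δ)).items.filter (fun p => !(p.2 == 0)))) k
        = if k = "H" then fdmToOpt (Nv "H" + δ) else fdmToOpt (Nv k) := by
    intro δ k
    rw [get?_mk_filter _ k (PySem.Dict.nodup_keys_insert nlc _ _ hnnodup)]
    show (PySem.Dict.get? (PySem.Dict.insert nlc "H" (PySem.Dict.getD nlc "H" 0 + δ)) k).bind fdmToOpt = _
    rw [PySem.Dict.get?_insert, hnlcH]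
    by_cases hk : k = "H"
    · simp [hk]
    · simp only [if_neg hk, hnget k]
      by_cases h0 : Nv k = 0 <;> simp [fdmToOpt, h0]
  -- characterise A by cases on the negative guard
  by_cases hneg : ((PySem.Dict.values diff).any (fun v => decide (v < 0))) = true
  · rw [if_pos hneg]
    rw [values_any_neg diff hdnodup] at hneg
    obtain ⟨k, v, hkv, hv⟩ := hneg
    have hDk : Dv k < 0 := by
      rw [hdget k] at hkv
      by_cases h0 : Dv k = 0
      · simp [fdmToOpt, h0] at hkv
      · simp [fdmToOpt, h0] at hkv; omega
    constructor
    · intro h; exact absurd h (by simp)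
    · intro hB; exfalso
      rw [fdmAltLoop_spec] at hB
      simp only [← hDv', ← hNv'] at hB
      have hkks : k ∈ ks := by
        by_contra hk
        have := (hout k hk).1
        omega
      have := (hB.1 k hkks).1
      omega
  · rw [if_neg hneg]
    have hpos : ∀ k, 0 ≤ Dv k := by
      intro k
      by_contra hk
      push_neg at hk
      exact hneg ((values_any_neg diff hdnodup).mpr
        ⟨k, Dv k, by rw [hdget k]; simp only [fdmToOpt, if_neg (by omega : ¬ Dv k = 0)], hk⟩)
    constructor
    · -- A → B
      intro hA
      have hmatch : ∃ δ : Int, |δ| ≤ 1 ∧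
          (∀ k, k ≠ "H" → Dv k = Nv k) ∧ Dv "H" = Nv "H" + δ := by
        split_ifs at hA with he0
        · rw [pyDictEq_iff] at he0
          refine ⟨0, by simp, fun k hk => ?_, ?_⟩
          · have := he0 k; rw [hdget k, hnget k, fdmToOpt_inj] at this; exact this
          · have := he0 "H"; rw [hdget _, hnget _, fdmToOpt_inj] at this; omega
        · simp only [List.any_cons, List.any_nil, Bool.or_eq_true, Bool.or_false] at hA
          rcases hA with hA | hA <;> rw [pyDictEq_iff] at hA
          · refine ⟨-1, by simp, fun k hk => ?_, ?_⟩
            · have := hA k; rw [hdget k, hadjget (-1) k, if_neg hk, fdmToOpt_inj] at this; exact this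
            · have := hA "H"; rw [hdget _, hadjget (-1) "H", if_pos rfl, fdmToOpt_inj] at this; exact this
          · refine ⟨1, by simp, fun k hk => ?_, ?_⟩
            · have := hA k; rw [hdget k, hadjget 1 k, if_neg hk, fdmToOpt_inj] at this; exact this
            · have := hA "H"; rw [hdget _, hadjget 1 "H", if_pos rfl, fdmToOpt_inj] at this; exact this
      obtain ⟨δ, hδ, hne, hH⟩ := hmatch
      rw [fdmAltLoop_spec]
      simp only [← hDv', ← hNv']
      refine ⟨fun el _ => ⟨hpos el, fun h => hne el h⟩, ?_⟩
      have habs : |Dv "H" - Nv "H"| ≤ 1 := by rw [hH]; simpa using hδ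
      split_ifs with hHks
      · exact habs
      · simp
    · -- B → A
      intro hB
      rw [fdmAltLoop_spec] at hB
      simp only [← hDv', ← hNv'] at hB
      obtain ⟨h1, h2⟩ := hB
      have hall : ∀ k, k ≠ "H" → Dv k = Nv k := by
        intro k hk
        by_cases hks' : k ∈ ks
        · exact (h1 k hks').2 hk
        · obtain ⟨hd0, hn0⟩ := hout k hks'
          omega
      have habs : |Dv "H" - Nv "H"| ≤ 1 := by
        split_ifs at h2 with hHks
        · exact h2
        · obtain ⟨hd0, hn0⟩ := hout "H" hHks
          rw [hd0, hn0]; simp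
      have heq : ∀ δ' : Int, Dv "H" = Nv "H" + δ' →
          ∀ k, PySem.Dict.get? diff k
            = if k = "H" then fdmToOpt (Nv "H" + δ') else fdmToOpt (Nv k) := by
        intro δ' hH k
        rw [hdget k]
        by_cases hk : k = "H"
        · rw [if_pos hk, hk, hH]
        · rw [if_neg hk, hall k hk]
      by_cases h0 : pyDictEq diff nlc = true
      · rw [if_pos h0]
      · rw [if_neg h0]
        have hδ : Dv "H" - Nv "H" = -1 ∨ Dv "H" - Nv "H" = 0 ∨ Dv "H" - Nv "H" = 1 := by
          rw [abs_le] at habs; omega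
        rcases hδ with h | h | h
        · have hm : pyDictEq diff (PySem.Dict.mk ((PySem.Dict.insert nlc "H" (PySem.Dict.getD nlc "H" 0 + (-1))).items.filter (fun p => !(p.2 == 0)))) = true := by
            rw [pyDictEq_iff]
            intro k
            rw [hadjget (-1) k]
            exact heq (-1) (by omega) k
          simp only [List.any_cons, List.any_nil, Bool.or_eq_true]
          left
          exact hm
        · exfalso
          apply h0
          rw [pyDictEq_iff]
          intro k
          rw [hnget k]
          have := heq 0 (by omega) k
          rw [this]
          by_cases hk : k = "H" <;> simp [hk]
        · have hm : pyDictEq diff (PySem.Dict.mk ((PySem.Dict.insert nlc "H" (PySem.Dict.getD nlc "H" 0 + 1)).items.filter (fun p => !(p.2 == 0)))) = true := by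
            rw [pyDictEq_iff]
            intro k
            rw [hadjget 1 k]
            exact heq 1 (by omega) k
          simp only [List.any_cons, List.any_nil, Bool.or_eq_true]
          right; left
          exact hm

-- ===== VERDICT (by name: the statement is the Claim_ definition above) =====
theorem formula_difference_matches_py_spec : Claim_equal_formula_difference_matches_py := by
  intro comp_a comp_b nl_formula _
  exact fdm_port_eq comp_a comp_b nl_formula
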